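-- pv_equiv track=rewrite | github.com/jkind889/hackathon | app.py | _breach_grade
-- ===== SOURCE A (Python) =====
-- def _breach_grade(incidents: list[dict]) -> tuple[str, str]:
--     deductions = {"high": 28, "medium": 16, "low": 8}
--     score = 100
--     for incident in incidents:
--         score -= deductions.get(incident.get("severity", "low"), 8)
--     score = max(0, score)
--
--     if score >= 85:
--         return "A", "Low"
--     if score >= 70:
--         return "B", "Low"
--     if score >= 55:
--         return "C", "Medium"
--     if score >= 40:
--         return "D", "High"
--     return "F", "High"
-- ===== SOURCE B (Python) =====
-- def _breach_grade(incidents):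
--     # One staged pass: extract effective severities, count categories, then use
--     # a closed-form arithmetic index (no threshold comparisons, no per-incident lookup).
--     sevs = [i.get("severity", "low") for i in incidents]
--     n, h, m = len(sevs), sevs.count("high"), sevs.count("medium")
--     score = max(0, 100 - 8 * n - 20 * h - 8 * m)
--     idx = max(0, min(4, (score - 40) // 15 + 1))
--     return [("F", "High"), ("D", "High"), ("C", "Medium"), ("B", "Low"), ("A", "Low")][idx]
-- ===== Notes on version B (the rewrite author's own statement) =====
-- stated objective: alternative
-- what changed: Instead of a running per-incident dict-lookup subtraction and a descending if-cascade, B stages the work: it extracts the effective severity strings, counts the high/medium categories, computes the score in one closed-form expression from those counts, and selects the (grade, risk) row from a table by an arithmetic floor-division index ((score-40)//15+1 clamped to 0..4) with no threshold comparisons at all.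
import Mathlib
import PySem

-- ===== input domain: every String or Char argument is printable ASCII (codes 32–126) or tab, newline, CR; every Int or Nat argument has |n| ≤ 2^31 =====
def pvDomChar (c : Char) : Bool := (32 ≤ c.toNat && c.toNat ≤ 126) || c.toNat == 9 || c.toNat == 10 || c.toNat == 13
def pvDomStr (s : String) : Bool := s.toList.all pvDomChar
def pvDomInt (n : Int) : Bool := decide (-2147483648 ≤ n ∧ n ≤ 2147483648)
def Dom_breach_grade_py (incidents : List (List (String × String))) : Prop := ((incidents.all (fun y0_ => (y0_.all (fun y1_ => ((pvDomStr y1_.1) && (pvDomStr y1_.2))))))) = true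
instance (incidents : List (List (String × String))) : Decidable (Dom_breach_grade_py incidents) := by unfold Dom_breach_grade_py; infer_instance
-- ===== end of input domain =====

-- B replaces A's per-incident deduction lookup and descending threshold cascade by
-- staged passes: extract severities, count the categories, compute the score in closed
-- form, and pick the (grade, risk) row by an arithmetic floor-division index.

-- ===== PORT A =====
def breach_grade_py (incidents : List (List (String × String))) : String × String :=
  let deductions : PySem.Dict String Int :=
    PySem.Dict.ofList [("high", 28), ("medium", 16), ("low", 8)]
  let score : Int := incidents.foldl (fun score incident =>
    score - deductions.getD (PySem.Dict.getD (PySem.Dict.ofList incident) "severity" "low") 8) 100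
  let score := max 0 score
  if 85 ≤ score then ("A", "Low")
  else if 70 ≤ score then ("B", "Low")
  else if 55 ≤ score then ("C", "Medium")
  else if 40 ≤ score then ("D", "High")
  else ("F", "High")

-- ===== PORT B =====
def bgSev (incident : List (String × String)) : String :=
  PySem.Dict.getD (PySem.Dict.ofList incident) "severity" "low"

def bgTable : List (String × String) :=
  [("F", "High"), ("D", "High"), ("C", "Medium"), ("B", "Low"), ("A", "Low")]

def breach_grade_py_alt (incidents : List (List (String × String))) : String × String :=
  let sevs : List String := incidents.map bgSev
  let n : Int := sevs.length
  let h : Int := PySem.List.count sevs "high"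
  let m : Int := PySem.List.count sevs "medium"
  let score : Int := max 0 (100 - 8 * n - 20 * h - 8 * m)
  let idx : Int := max 0 (min 4 (PySem.Int.floordiv (score - 40) 15 + 1))
  -- list indexing; the index is provably in range, .getD only makes the port total
  (PySem.List.pyGet? bgTable idx).getD ("F", "High")

-- ===== PRECONDITION & SPEC =====
def Spec_breach_grade_py (incidents : List (List (String × String))) (out : String × String) : Prop := out = breach_grade_py_alt incidents
instance (incidents : List (List (String × String))) (out : String × String) : Decidable (Spec_breach_grade_py incidents out) := by unfold Spec_breach_grade_py; infer_instance

-- ===== CLAIM (what is proved, stated in full; the proofs are below) =====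
def Claim_equal_breach_grade_py : Prop := ∀ (incidents : List (List (String × String))), Dom_breach_grade_py incidents → Spec_breach_grade_py incidents (breach_grade_py incidents)

-- ===== LEMMAS AND PROOFS =====

-- the deduction dictionary lookup, pointwise
theorem bg_ded_eq (s : String) :
    PySem.Dict.getD (PySem.Dict.ofList [("high", (28:Int)), ("medium", 16), ("low", 8)]) s 8
      = if s = "high" then 28 else if s = "medium" then 16 else 8 := by
  by_cases h1 : s = "high"
  · subst h1; decide
  by_cases h2 : s = "medium"
  · subst h2; decide
  by_cases h3 : s = "low"
  · subst h3; decide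
  have hd : (PySem.Dict.ofList [("high", (28:Int)), ("medium", 16), ("low", 8)])
      = PySem.Dict.mk [("high", 28), ("medium", 16), ("low", 8)] := rfl
  rw [hd, PySem.Dict.getD_eq_get?_getD]
  simp [PySem.Dict.get?, h1, h2,
    Ne.symm h1, Ne.symm h2, Ne.symm h3]

-- A's running subtraction in terms of the severity counts
theorem bg_score_eq (incidents : List (List (String × String))) (init : Int) :
    incidents.foldl (fun s i =>
        s - PySem.Dict.getD (PySem.Dict.ofList [("high", (28:Int)), ("medium", 16), ("low", 8)])
              (PySem.Dict.getD (PySem.Dict.ofList i) "severity" "low") 8) init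
      = init - 8 * (incidents.map bgSev).length
             - 20 * ((incidents.map bgSev).count "high" : Int)
             - 8 * ((incidents.map bgSev).count "medium" : Int) := by
  induction incidents generalizing init with
  | nil => simp
  | cons x xs ih =>
    simp only [List.foldl_cons, List.map_cons, List.length_cons, List.count_cons]
    rw [ih, bg_ded_eq]
    by_cases h1 : bgSev x = "high" <;> by_cases h2 : bgSev x = "medium" <;>
      simp_all [bgSev] <;> omega

-- the arithmetic index into the table agrees with the cascade, for every score
theorem bg_grade_eq (score : Int) :
    (PySem.List.pyGet? bgTable (max 0 (min 4 (PySem.Int.floordiv (score - 40) 15 + 1)))).getD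
        ("F", "High")
      = if 85 ≤ score then ("A", "Low")
        else if 70 ≤ score then ("B", "Low")
        else if 55 ≤ score then ("C", "Medium")
        else if 40 ≤ score then ("D", "High")
        else ("F", "High") := by
  rw [PySem.Int.floordiv_eq_ediv_of_pos (by norm_num : (0:Int) < 15)]
  by_cases h85 : 85 ≤ score
  · have hidx : max 0 (min 4 ((score - 40) / 15 + 1)) = 4 := by omega
    rw [hidx]; simp [h85, bgTable, PySem.List.pyGet?, PySem.List.pyIdx?]
  · by_cases h70 : 70 ≤ score
    · have hidx : max 0 (min 4 ((score - 40) / 15 + 1)) = 3 := by omega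
      rw [hidx]; simp [h85, h70, bgTable, PySem.List.pyGet?, PySem.List.pyIdx?]
    · by_cases h55 : 55 ≤ score
      · have hidx : max 0 (min 4 ((score - 40) / 15 + 1)) = 2 := by omega
        rw [hidx]; simp [h85, h70, h55, bgTable, PySem.List.pyGet?, PySem.List.pyIdx?]
      · by_cases h40 : 40 ≤ score
        · have hidx : max 0 (min 4 ((score - 40) / 15 + 1)) = 1 := by omega
          rw [hidx]; simp [h85, h70, h55, h40, bgTable, PySem.List.pyGet?, PySem.List.pyIdx?]
        · have hidx : max 0 (min 4 ((score - 40) / 15 + 1)) = 0 := by omega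
          rw [hidx]; simp [h85, h70, h55, h40, bgTable, PySem.List.pyGet?, PySem.List.pyIdx?]

-- ===== VERDICT (by name: the statement is the Claim_ definition above) =====
theorem breach_grade_py_spec : Claim_equal_breach_grade_py := by
  intro incidents _
  unfold Spec_breach_grade_py breach_grade_py breach_grade_py_alt
  dsimp only
  rw [bg_score_eq, PySem.List.count_eq, PySem.List.count_eq, bg_grade_eq]
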